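-- pv_equiv track=rewrite | github.com/HaroldMills/Vesper | vesper/ephem/usno_rise_set_table.py | _strip_leading_and_trailing_blank_lines
-- ===== SOURCE A (Python) =====
-- def _strip_leading_and_trailing_blank_lines(lines):
--
--     end = len(lines)
--
--     start = 0
--     while start != end and lines[start].strip() == '':
--         start += 1
--
--     while end != 0 and lines[end - 1].strip() == '':
--         end -= 1
--
--     return lines[start:end]
-- ===== SOURCE B (Python) =====
-- def _strip_leading_and_trailing_blank_lines(lines):
--     idx = [i for i, line in enumerate(lines) if line.strip() != '']
--     if not idx:
--         return []
--     return lines[idx[0]:idx[-1] + 1]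
-- ===== Notes on version B (the rewrite author's own statement) =====
-- stated objective: alternative
-- what changed: B builds the index list of non-blank lines in one forward enumerate pass and slices from its first and last entries, instead of A's two inward-scanning while loops.
import Mathlib
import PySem

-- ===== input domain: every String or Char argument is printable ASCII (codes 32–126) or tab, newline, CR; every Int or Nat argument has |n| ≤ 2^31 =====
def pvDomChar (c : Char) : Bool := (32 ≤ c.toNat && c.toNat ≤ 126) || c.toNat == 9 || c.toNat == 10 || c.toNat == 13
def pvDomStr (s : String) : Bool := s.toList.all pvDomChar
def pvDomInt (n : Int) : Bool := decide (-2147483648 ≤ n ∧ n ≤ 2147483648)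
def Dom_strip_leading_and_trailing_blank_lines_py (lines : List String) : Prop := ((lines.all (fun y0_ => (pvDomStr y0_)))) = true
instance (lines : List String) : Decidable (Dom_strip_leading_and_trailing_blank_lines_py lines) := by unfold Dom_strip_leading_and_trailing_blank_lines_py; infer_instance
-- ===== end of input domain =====

-- B replaces A's two inward-scanning while loops by one enumerate pass collecting the
-- indices of non-blank lines, then slices from the first and last collected index
-- (objective: alternative decomposition; same O(n) cost).

-- ===== PORT A =====
-- 'while start != end and lines[start].strip() == "": start += 1'.  start ≤ end holds
-- throughout in Python, so 'start != end' is written as the equivalent 'start < fin'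
-- (needed for termination); lines.getD start "" is lines[start], always in range here.
def stripStartLoop (lines : List String) (start fin : Nat) : Nat :=
  if start < fin ∧ PySem.Str.strip (lines.getD start "") = "" then
    stripStartLoop lines (start + 1) fin
  else start
termination_by fin - start

-- 'while end != 0 and lines[end - 1].strip() == "": end -= 1'
def stripEndLoop (lines : List String) (e : Nat) : Nat :=
  if e ≠ 0 ∧ PySem.Str.strip (lines.getD (e - 1) "") = "" then
    stripEndLoop lines (e - 1)
  else e
termination_by e

def strip_leading_and_trailing_blank_lines_py (lines : List String) : List String :=
  PySem.List.slice lines (some (stripStartLoop lines 0 lines.length : Int))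
    (some (stripEndLoop lines lines.length : Int))

-- ===== PORT B =====
-- idx = [i for i, line in enumerate(lines) if line.strip() != '']
-- if not idx: return []
-- return lines[idx[0]:idx[-1] + 1]
def strip_leading_and_trailing_blank_lines_py_alt (lines : List String) : List String :=
  let idx := ((PySem.List.enumerate lines 0).filter
      (fun p => !(PySem.Str.strip p.2 == ""))).map Prod.fst
  match idx with
  | [] => []
  | i :: rest =>
      PySem.List.slice lines (some i) (some ((i :: rest).getLast (List.cons_ne_nil i rest) + 1))

-- ===== PRECONDITION & SPEC =====
def Spec_strip_leading_and_trailing_blank_lines_py (lines : List String) (out : List String) : Prop := out = strip_leading_and_trailing_blank_lines_py_alt lines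
instance (lines : List String) (out : List String) : Decidable (Spec_strip_leading_and_trailing_blank_lines_py lines out) := by unfold Spec_strip_leading_and_trailing_blank_lines_py; infer_instance

-- ===== CLAIM (what is proved, stated in full; the proofs are below) =====
def Claim_equal_strip_leading_and_trailing_blank_lines_py : Prop := ∀ (lines : List String), Dom_strip_leading_and_trailing_blank_lines_py lines → Spec_strip_leading_and_trailing_blank_lines_py lines (strip_leading_and_trailing_blank_lines_py lines)

-- ===== LEMMAS AND PROOFS =====

-- 'blank line' predicate shared by the proofs
def pvBlank (s : String) : Bool := PySem.Str.strip s == ""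

-- index list B computes, as a named function for the proofs
def pvIdx (l : List String) (s : Int) : List Int :=
  ((PySem.List.enumerate l s).filter (fun p => !(PySem.Str.strip p.2 == ""))).map Prod.fst

theorem pvIdx_append (l1 l2 : List String) (s : Int) :
    pvIdx (l1 ++ l2) s = pvIdx l1 s ++ pvIdx l2 (s + l1.length) := by
  simp [pvIdx, PySem.List.enumerate_append, List.filter_append]

theorem pvIdx_all_blank {l : List String} (h : ∀ x ∈ l, pvBlank x) (s : Int) :
    pvIdx l s = [] := by
  unfold pvIdx
  rw [List.map_eq_nil_iff, List.filter_eq_nil_iff]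
  intro p hp
  obtain ⟨k, hk, rfl⟩ := (PySem.List.mem_enumerate_iff l s p).mp hp
  have := h _ (List.getElem_mem hk)
  simpa [pvBlank] using this


theorem pvIdx_cons_nonblank {y : String} (hy : ¬ pvBlank y) (ys : List String) (s : Int) :
    pvIdx (y :: ys) s = s :: pvIdx ys (s + 1) := by
  simp only [pvBlank] at hy
  simp [pvIdx, PySem.List.enumerate_cons, hy]

theorem pvAlt_eq (l : List String) :
    strip_leading_and_trailing_blank_lines_py_alt l =
      match pvIdx l 0 with
      | [] => []
      | i :: rest =>
          PySem.List.slice l (some i) (some ((i :: rest).getLast (List.cons_ne_nil i rest) + 1)) := rfl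

theorem stripStartLoop_spec (l : List String) :
    ∀ i, i ≤ l.length →
      stripStartLoop l i l.length = i + ((l.drop i).takeWhile pvBlank).length := by
  suffices h : ∀ n i, l.length - i = n → i ≤ l.length →
      stripStartLoop l i l.length = i + ((l.drop i).takeWhile pvBlank).length by
    intro i hi; exact h _ i rfl hi
  intro n
  induction n with
  | zero =>
      intro i hn hi
      have hil : i = l.length := by omega
      rw [stripStartLoop, if_neg (by omega)]
      simp [hil]
  | succ n ih =>
      intro i hn hi
      have hlt : i < l.length := by omega
      have hget : l.getD i "" = l[i] := List.getD_eq_getElem l "" hlt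
      have hdrop : l.drop i = l[i] :: l.drop (i + 1) := List.drop_eq_getElem_cons hlt
      by_cases hb : PySem.Str.strip l[i] = ""
      · rw [stripStartLoop, if_pos ⟨hlt, by rw [hget]; exact hb⟩,
          ih (i + 1) (by omega) (by omega), hdrop,
          List.takeWhile_cons_of_pos (by simp [pvBlank, hb])]
        simp; omega
      · rw [stripStartLoop, if_neg (by rw [hget]; tauto), hdrop,
          List.takeWhile_cons_of_neg (by simp [pvBlank, hb])]
        simp

theorem stripEndLoop_spec (l : List String) :
    ∀ e, e ≤ l.length →
      stripEndLoop l e = e - ((l.take e).rtakeWhile pvBlank).length := by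
  intro e
  induction e with
  | zero => intro _; rw [stripEndLoop, if_neg (by simp)]; simp
  | succ e ih =>
      intro he
      have hlt : e < l.length := by omega
      have hget : l.getD (e + 1 - 1) "" = l[e] := by
        simpa using List.getD_eq_getElem l "" hlt
      have htake : l.take (e + 1) = l.take e ++ [l[e]] := by
        rw [← List.take_concat_get hlt, List.concat_eq_append]
      by_cases hb : PySem.Str.strip l[e] = ""
      · rw [stripEndLoop, if_pos ⟨by omega, by rw [hget]; exact hb⟩]
        have := ih (by omega)
        simp only [Nat.add_sub_cancel] at this ⊢
        rw [this, htake, List.rtakeWhile_concat_pos pvBlank (l.take e) l[e] (by simp [pvBlank, hb])]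
        have hle : (List.rtakeWhile pvBlank (l.take e)).length ≤ e := by
          calc (List.rtakeWhile pvBlank (l.take e)).length
              ≤ (l.take e).length := List.IsSuffix.length_le (List.rtakeWhile_suffix pvBlank (l.take e))
            _ ≤ e := by simp
        simp only [List.length_append, List.length_cons, List.length_nil]
        omega
      · rw [stripEndLoop, if_neg (by rw [hget]; tauto), htake,
          List.rtakeWhile_concat_neg pvBlank (l.take e) l[e] (by simp [pvBlank, hb])]
        simp

-- ===== VERDICT (by name: the statement is the Claim_ definition above) =====
theorem strip_leading_and_trailing_blank_lines_py_spec : Claim_equal_strip_leading_and_trailing_blank_lines_py := by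
  intro lines _
  unfold Spec_strip_leading_and_trailing_blank_lines_py
  have hs : stripStartLoop lines 0 lines.length = (lines.takeWhile pvBlank).length := by
    simpa using stripStartLoop_spec lines 0 (Nat.zero_le _)
  have he : stripEndLoop lines lines.length =
      lines.length - (lines.rtakeWhile pvBlank).length := by
    simpa using stripEndLoop_spec lines lines.length le_rfl
  have hA : strip_leading_and_trailing_blank_lines_py lines =
      (lines.drop (lines.takeWhile pvBlank).length).take
        ((lines.length - (lines.rtakeWhile pvBlank).length) -
          (lines.takeWhile pvBlank).length) := by
    unfold strip_leading_and_trailing_blank_lines_py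
    rw [hs, he, PySem.List.slice_natCast]
  rw [pvAlt_eq]
  by_cases hall : ∀ x ∈ lines, pvBlank x
  · rw [pvIdx_all_blank hall 0]
    have hr : lines.rtakeWhile pvBlank = lines := List.rtakeWhile_eq_self_iff.mpr hall
    rw [hA, hr]
    simp
  · -- some line is non-blank
    push Not at hall
    obtain ⟨w, hwmem, hwnb⟩ := hall
    -- tail decomposition: lines = rdropWhile ++ rtakeWhile, rdropWhile nonempty ending non-blank
    have ht : lines.rdropWhile pvBlank ≠ [] := by
      intro hnil
      exact hwnb (List.rdropWhile_eq_nil_iff.mp hnil w hwmem)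
    have hxnb : ¬ pvBlank ((lines.rdropWhile pvBlank).getLast ht) :=
      List.rdropWhile_last_not pvBlank lines ht
    have htdec : (lines.rdropWhile pvBlank).dropLast ++
        [(lines.rdropWhile pvBlank).getLast ht] = lines.rdropWhile pvBlank :=
      List.dropLast_concat_getLast ht
    have hsplit : lines.rdropWhile pvBlank ++ lines.rtakeWhile pvBlank = lines :=
      List.rdropWhile_append_rtakeWhile
    -- idx ends in (rdropWhile length - 1)
    have hlast : pvIdx lines 0 =
        pvIdx (lines.rdropWhile pvBlank).dropLast 0 ++
          [((lines.rdropWhile pvBlank).dropLast.length : Int)] := by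
      conv_lhs => rw [← hsplit, ← htdec]
      rw [pvIdx_append, pvIdx_all_blank (fun x hx => List.mem_rtakeWhile_imp hx) _,
        List.append_nil, pvIdx_append]
      rw [pvIdx_cons_nonblank hxnb]
      simp [pvIdx]
    -- idx starts at the leading-blank count
    have hdw : lines.dropWhile pvBlank ≠ [] := by
      intro hnil
      exact hwnb (List.dropWhile_eq_nil_iff.mp hnil w hwmem)
    have hynb : ¬ pvBlank ((lines.dropWhile pvBlank).head hdw) := by
      simp [List.head_dropWhile_not pvBlank hdw]
    have hddec : (lines.dropWhile pvBlank).head hdw :: (lines.dropWhile pvBlank).tail =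
        lines.dropWhile pvBlank := List.cons_head_tail hdw
    have hhead : pvIdx lines 0 =
        ((lines.takeWhile pvBlank).length : Int) ::
          pvIdx (lines.dropWhile pvBlank).tail ((lines.takeWhile pvBlank).length + 1) := by
      conv_lhs => rw [← List.takeWhile_append_dropWhile (p := pvBlank) (l := lines), ← hddec]
      rw [pvIdx_append, pvIdx_all_blank (fun x hx => List.mem_takeWhile_imp hx) _,
        List.nil_append, pvIdx_cons_nonblank hynb]
      simp
    rw [hhead]
    -- the match reduces on the cons
    show strip_leading_and_trailing_blank_lines_py lines =
      PySem.List.slice lines (some ((lines.takeWhile pvBlank).length : Int))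
        (some ((((lines.takeWhile pvBlank).length : Int) ::
            pvIdx (lines.dropWhile pvBlank).tail ((lines.takeWhile pvBlank).length + 1)).getLast
          (List.cons_ne_nil _ _) + 1))
    -- last element of idx
    have h2 : (((lines.takeWhile pvBlank).length : Int) ::
        pvIdx (lines.dropWhile pvBlank).tail ((lines.takeWhile pvBlank).length + 1)).getLast? =
          some ((lines.rdropWhile pvBlank).dropLast.length : Int) := by
      rw [← hhead, hlast, List.getLast?_concat]
    have hgl : (((lines.takeWhile pvBlank).length : Int) ::
        pvIdx (lines.dropWhile pvBlank).tail ((lines.takeWhile pvBlank).length + 1)).getLast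
          (List.cons_ne_nil _ _) = ((lines.rdropWhile pvBlank).dropLast.length : Int) := by
      have h1 := List.getLast?_eq_some_getLast (l := ((lines.takeWhile pvBlank).length : Int) ::
        pvIdx (lines.dropWhile pvBlank).tail ((lines.takeWhile pvBlank).length + 1))
        (List.cons_ne_nil _ _)
      rw [h1] at h2
      exact Option.some.inj h2
    rw [hgl]
    have hlen1 : 1 ≤ (lines.rdropWhile pvBlank).length := by
      cases hcl : lines.rdropWhile pvBlank with
      | nil => exact absurd hcl ht
      | cons a l' => simp
    have hcast : ((lines.rdropWhile pvBlank).dropLast.length : Int) + 1 =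
        (((lines.rdropWhile pvBlank).length : Nat) : Int) := by
      rw [List.length_dropLast]
      omega
    rw [hcast, PySem.List.slice_natCast, hA]
    have hlen : (lines.rdropWhile pvBlank).length + (lines.rtakeWhile pvBlank).length =
        lines.length := by
      rw [← List.length_append, hsplit]
    congr 1
    omega
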